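-- pv_equiv track=rewrite | github.com/Klaynie/Learning-Python | Learning Python/Chapter 12/Exercise1206.py | createWordListWithOneLetterRemoved
-- ===== SOURCE A (Python) =====
-- def createWordListWithOneLetterRemoved(word):
--     i = 0
--     newWordList = []
--     if len(word) == 1:
--         return newWordList
--     while i <= len(word)-1:
--         newWord = ''
--         j = 0
--         while j <= len(word)-1:
--             for letter in word:
--                 if j != i:
--                     newWord += letter
--                 j += 1
--         newWordList.append(newWord)
--         i +=1
--     return newWordList
-- ===== SOURCE B (Python) =====
-- def createWordListWithOneLetterRemoved(word):
--     if len(word) <= 1: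
--         return []
--     out = []
--     pre = ''
--     rest = word
--     while rest:
--         out.append(pre + rest[1:])
--         pre += rest[0]
--         rest = rest[1:]
--     return out
-- ===== Notes on version B (the rewrite author's own statement) =====
-- stated objective: simpler
-- what changed: Replaces A's index-counting nested loops (per-position letter filtering with a redundant inner while) by a single prefix/suffix sweep: walk the word once, emitting prefix + tail-after-current-letter at each step.
import Mathlib
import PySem

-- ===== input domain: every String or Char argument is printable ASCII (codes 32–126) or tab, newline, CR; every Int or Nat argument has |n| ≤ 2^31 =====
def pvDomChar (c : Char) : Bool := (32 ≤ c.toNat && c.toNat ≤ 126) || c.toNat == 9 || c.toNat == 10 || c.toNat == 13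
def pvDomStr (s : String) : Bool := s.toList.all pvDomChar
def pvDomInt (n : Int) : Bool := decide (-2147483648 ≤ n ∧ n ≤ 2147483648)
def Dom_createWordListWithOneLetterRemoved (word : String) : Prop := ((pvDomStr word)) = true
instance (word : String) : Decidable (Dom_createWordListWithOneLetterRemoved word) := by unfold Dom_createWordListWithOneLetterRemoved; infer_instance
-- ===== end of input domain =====

-- B replaces A's index-counting nested loops by a single prefix/suffix sweep; objective: simpler.


-- ===== PORT A =====
-- inner 'for letter in word' pass: state = (newWord as List Char, j)
def pvPassA (w : List Char) (i : Int) (st : List Char × Int) : List Char × Int :=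
  w.foldl (fun s c => ((if s.2 ≠ i then s.1 ++ [c] else s.1), s.2 + 1)) st

-- inner 'while j <= len(word)-1' loop; fuel only makes it total (the Python loop
-- re-checks the condition after the for-pass has advanced j past the bound)
def pvInnerA (fuel : Nat) (w : List Char) (i : Int) (nw : List Char) (j : Int) : List Char :=
  match fuel with
  | 0 => nw
  | f + 1 =>
    if j ≤ (w.length : Int) - 1 then
      let p := pvPassA w i (nw, j)
      pvInnerA f w i p.1 p.2
    else nw

def createWordListWithOneLetterRemoved (word : String) : List String :=
  if word.toList.length = 1 then []
  else
    (List.range word.toList.length).foldl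
      (fun acc (i : Nat) => acc ++ [String.mk (pvInnerA (word.toList.length + 2) word.toList (i : Int) [] 0)]) []

-- ===== PORT B =====
-- 'while rest: out.append(pre + rest[1:]); pre += rest[0]; rest = rest[1:]'
def pvSweepB (pre rest : List Char) : List String :=
  match rest with
  | [] => []
  | c :: rs => String.mk (pre ++ rs) :: pvSweepB (pre ++ [c]) rs

def createWordListWithOneLetterRemoved_alt (word : String) : List String :=
  if word.toList.length ≤ 1 then [] else pvSweepB [] word.toList

-- ===== PRECONDITION & SPEC =====
def Spec_createWordListWithOneLetterRemoved (word : String) (out : List String) : Prop := out = createWordListWithOneLetterRemoved_alt word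
instance (word : String) (out : List String) : Decidable (Spec_createWordListWithOneLetterRemoved word out) := by unfold Spec_createWordListWithOneLetterRemoved; infer_instance

-- ===== CLAIM (what is proved, stated in full; the proofs are below) =====
def Claim_equal_createWordListWithOneLetterRemoved : Prop := ∀ (word : String), Dom_createWordListWithOneLetterRemoved word → Spec_createWordListWithOneLetterRemoved word (createWordListWithOneLetterRemoved word)

-- ===== LEMMAS AND PROOFS =====

-- chars of w at running index j, keeping those whose index ≠ i
def pvDel (w : List Char) (j i : Int) : List Char :=
  match w with
  | [] => []
  | c :: rs => if j ≠ i then c :: pvDel rs (j + 1) i else pvDel rs (j + 1) i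

theorem pvPassA_eq (w : List Char) (i : Int) : ∀ (nw : List Char) (j : Int),
    pvPassA w i (nw, j) = (nw ++ pvDel w j i, j + w.length) := by
  induction w with
  | nil => intro nw j; simp [pvPassA, pvDel]
  | cons c rs ih =>
    intro nw j
    by_cases h : j = i
    · have e : pvPassA (c :: rs) i (nw, j) = pvPassA rs i (nw, j + 1) := by
        simp [pvPassA, h]
      rw [e, ih]
      simp [pvDel, h]
      omega
    · have e : pvPassA (c :: rs) i (nw, j) = pvPassA rs i (nw ++ [c], j + 1) := by
        simp [pvPassA, h]
      rw [e, ih]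
      simp [pvDel, h, List.append_assoc]
      omega

theorem pvInnerA_eq (w : List Char) (i : Int) :
    pvInnerA (w.length + 2) w i [] 0 = pvDel w 0 i := by
  cases w with
  | nil => simp [pvInnerA, pvDel]
  | cons c rs =>
    show pvInnerA (rs.length + 2 + 1) (c :: rs) i [] 0 = _
    rw [pvInnerA]
    have h1 : (0 : Int) ≤ ((c :: rs).length : Int) - 1 := by
      simp only [List.length_cons]; push_cast; omega
    rw [if_pos h1, pvPassA_eq]
    show pvInnerA (rs.length + 1 + 1) (c :: rs) i ([] ++ pvDel (c :: rs) 0 i) (0 + ((c :: rs).length : Int)) = _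
    rw [pvInnerA]
    have h2 : ¬ ((0 : Int) + ((c :: rs).length : Int) ≤ ((c :: rs).length : Int) - 1) := by omega
    rw [if_neg h2]
    simp

theorem pvDel_lt (w : List Char) : ∀ (j i : Int), i < j → pvDel w j i = w := by
  induction w with
  | nil => intro j i _; rfl
  | cons c rs ih =>
    intro j i h
    have : j ≠ i := by omega
    simp [pvDel, this, ih (j + 1) i (by omega)]

theorem pvDel_shift (w : List Char) : ∀ (j i : Int), pvDel w (j + 1) (i + 1) = pvDel w j i := by
  induction w with
  | nil => intro j i; rfl
  | cons c rs ih =>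
    intro j i
    by_cases h : j = i
    · subst h
      simp [pvDel, ih]
    · have h1 : j + 1 ≠ i + 1 := by omega
      simp [pvDel, h, h1, ih]

theorem pvSweepB_eq (w : List Char) : ∀ (pre : List Char),
    (List.range w.length).map (fun (i : Nat) => String.mk (pre ++ pvDel w 0 (i : Int))) = pvSweepB pre w := by
  induction w with
  | nil => intro pre; simp [pvSweepB]
  | cons c rs ih =>
    intro pre
    rw [pvSweepB, List.length_cons, List.range_succ_eq_map]
    simp only [List.map_cons, List.map_map]
    congr 1
    · have : pvDel (c :: rs) 0 0 = rs := by
        simp [pvDel, pvDel_lt rs 1 0 (by omega)]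
      rw [Nat.cast_zero, this]
    · rw [← ih (pre ++ [c])]
      apply List.map_congr_left
      intro a _
      have hstep : pvDel (c :: rs) 0 ((a : Int) + 1) = c :: pvDel rs 0 (a : Int) := by
        have hne : (0 : Int) ≠ (a : Int) + 1 := by omega
        have h2 : pvDel rs 1 ((a : Int) + 1) = pvDel rs 0 (a : Int) := by
          simpa using pvDel_shift rs 0 (a : Int)
        simp [pvDel, hne, h2]
      simp only [Function.comp_apply, Nat.succ_eq_add_one, Nat.cast_add, Nat.cast_one, hstep]
      simp [List.append_assoc]

theorem pvFoldl_append_map {α β : Type} (f : α → β) (l : List α) :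
    l.foldl (fun acc x => acc ++ [f x]) [] = l.map f := by
  have h : ∀ (init : List β), l.foldl (fun acc x => acc ++ [f x]) init = init ++ l.map f := by
    induction l with
    | nil => intro init; simp
    | cons x xs ih => intro init; simp [List.foldl_cons, ih]
  simpa using h []

-- ===== VERDICT (by name: the statement is the Claim_ definition above) =====
theorem createWordListWithOneLetterRemoved_spec : Claim_equal_createWordListWithOneLetterRemoved := by
  intro word _
  show createWordListWithOneLetterRemoved word = createWordListWithOneLetterRemoved_alt word
  unfold createWordListWithOneLetterRemoved createWordListWithOneLetterRemoved_alt
  set w := word.toList with hw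
  by_cases h1 : w.length = 1
  · rw [if_pos h1, if_pos (by omega)]
  · rw [if_neg h1]
    by_cases h0 : w.length = 0
    · have hnil : w = [] := List.length_eq_zero_iff.mp h0
      rw [if_pos (by omega)]
      simp [hnil]
    · rw [if_neg (by omega), pvFoldl_append_map, ← pvSweepB_eq w []]
      apply List.map_congr_left
      intro i _
      rw [pvInnerA_eq]
      simp
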